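-- pv_equiv track=rewrite | github.com/kxlsx/sudoku-solver | sudokumod.py | bactrackCoordinates
-- ===== SOURCE A (Python) =====
-- def bactrackCoordinates(rowI, elementI, board):
--
--     maxBoardIndex = len(board) - 1
--
--     #go back a spot (if it's the first one, go up a row)
--     elementI -= 1
--     if elementI < 0:
--         rowI -= 1
--
--         #if it tried to backtrack from the first spot
--         if rowI < 0:
--             return
--
--         #it goes to the last spot of the previous row (it moves through the board like a snake)
--         else:
--             elementI = maxBoardIndex
--
--     #while the current element it's checking is a constant
--     #DOESN'T WORK PROPERLY i.e. doesn't work at all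
--     #UPDATE: i think it does now
--     while '$' in board[rowI][elementI]:
--
--         elementI -= 1
--         if elementI < 0:
--             rowI -= 1
--
--             #if it tried to backtrack from the first spot
--             if rowI < 0:
--                 return
--
--             #it goes to the last spot of the previous row (it moves through the board like a snake)
--             else:
--                 elementI = maxBoardIndex
--
--     return (rowI, elementI)
-- ===== SOURCE B (Python) =====
-- def bactrackCoordinates(rowI, elementI, board):
--     n = len(board)
--     flat = rowI * n + elementI
--     best = None
--     for f in range(flat):
--         r, c = divmod(f, n)
--         if '$' not in board[r][c]:
--             best = (r, c)
--     return best
-- ===== Notes on version B (the rewrite author's own statement) =====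
-- stated objective: alternative
-- what changed: B replaces A's backward snake walk with early exit (column-underflow/row-wrap special-casing repeated twice) by a forward pass over all preceding cells of the flattened grid that keeps the last non-constant cell seen.
-- outside the precondition, e.g. on bactrackCoordinates(1, -1, [['a', 'b'], ['c', 'd']]): A returns (0, 1), B returns (0, 0); on bactrackCoordinates(-1, 1, [['a'], ['b']]): A returns (-1, 0), B returns None; on bactrackCoordinates(1, 1, [['a'], ['b', 'c']]): A returns (1, 0), B raises IndexError
import Mathlib
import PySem

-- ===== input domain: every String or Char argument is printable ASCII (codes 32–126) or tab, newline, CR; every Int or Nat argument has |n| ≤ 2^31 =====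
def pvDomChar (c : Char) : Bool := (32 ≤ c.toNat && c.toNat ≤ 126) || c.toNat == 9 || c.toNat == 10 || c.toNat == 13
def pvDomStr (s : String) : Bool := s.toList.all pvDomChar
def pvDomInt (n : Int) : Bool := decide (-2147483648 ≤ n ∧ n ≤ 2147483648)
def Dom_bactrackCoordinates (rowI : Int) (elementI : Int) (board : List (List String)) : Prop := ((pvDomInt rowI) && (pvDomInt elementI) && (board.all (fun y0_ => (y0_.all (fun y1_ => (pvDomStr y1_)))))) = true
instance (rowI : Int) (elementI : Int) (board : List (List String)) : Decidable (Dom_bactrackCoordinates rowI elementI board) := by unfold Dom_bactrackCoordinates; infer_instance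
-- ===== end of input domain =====

-- B replaces A's backward snake walk with early exit (duplicated column-underflow/row-wrap
-- special-casing) by a forward pass over all preceding flattened cells keeping the last
-- non-constant one; objective: alternative algorithm, same worst-case cost.


-- ===== PORT A =====
-- A's while loop; fuel only makes it total (never exhausted inside Pre_)
def pvLoopA (board : List (List String)) (maxBoardIndex : Int) :
    Nat → Int → Int → Option (Int × Int)
  | 0, _, _ => none
  | fuel + 1, rowI, elementI =>
    match PySem.List.pyGet? board rowI with
    | none => none  -- Python IndexError
    | some row =>
      match PySem.List.pyGet? row elementI with
      | none => none  -- Python IndexError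
      | some s =>
        if PySem.Str.isIn "$" s then
          let elementI' := elementI - 1
          if elementI' < 0 then
            let rowI' := rowI - 1
            if rowI' < 0 then none
            else pvLoopA board maxBoardIndex fuel rowI' maxBoardIndex
          else pvLoopA board maxBoardIndex fuel rowI elementI'
        else some (rowI, elementI)

def bactrackCoordinates (rowI : Int) (elementI : Int) (board : List (List String)) : Option (Int × Int) :=
  let maxBoardIndex : Int := (board.length : Int) - 1
  let fuel : Nat := (board.length + 1) * (board.length + 1)
  let elementI' := elementI - 1
  if elementI' < 0 then
    let rowI' := rowI - 1
    if rowI' < 0 then none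
    else pvLoopA board maxBoardIndex fuel rowI' maxBoardIndex
  else pvLoopA board maxBoardIndex fuel rowI elementI'

-- ===== PORT B =====
-- forward pass over range(flat); the `best`-returning arms mark Python exceptions
-- (ZeroDivisionError / IndexError), reachable only outside Pre_
def bactrackCoordinates_alt (rowI : Int) (elementI : Int) (board : List (List String)) : Option (Int × Int) :=
  let n : Int := board.length
  let flat : Int := rowI * n + elementI
  (PySem.List.pyRange 0 flat 1).foldl (fun best f =>
    match PySem.Int.divmod? f n with
    | none => best  -- ZeroDivisionError (outside Pre_)
    | some (r, c) =>
      match PySem.List.pyGet? board r with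
      | none => best  -- IndexError (outside Pre_)
      | some row =>
        match PySem.List.pyGet? row c with
        | none => best  -- IndexError (outside Pre_)
        | some s => if PySem.Str.isIn "$" s then best else some (r, c)) none

-- ===== PRECONDITION & SPEC =====
-- Pre_ excludes out-of-range or negative starting indices — there A relies on Python's
-- negative-index wraparound / raises IndexError — and ragged boards with a row shorter
-- than len(board), on which A may raise; the no-access corner rowI ≤ 0 ∧ elementI ≤ 0
-- (both return None) stays inside Pre_.
def Pre_bactrackCoordinates (rowI : Int) (elementI : Int) (board : List (List String)) : Prop :=
  (0 ≤ rowI ∧ rowI < (board.length : Int) ∧ 0 ≤ elementI ∧ elementI ≤ (board.length : Int) ∧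
     ∀ row ∈ board, board.length ≤ row.length)
  ∨ (rowI ≤ 0 ∧ elementI ≤ 0)
instance (rowI : Int) (elementI : Int) (board : List (List String)) : Decidable (Pre_bactrackCoordinates rowI elementI board) := by unfold Pre_bactrackCoordinates; infer_instance

def pvWitness_bactrackCoordinates : Int × Int × List (List String) := (0, 1, [["x"]])

def Spec_bactrackCoordinates (rowI : Int) (elementI : Int) (board : List (List String)) (out : Option (Int × Int)) : Prop := out = bactrackCoordinates_alt rowI elementI board
instance (rowI : Int) (elementI : Int) (board : List (List String)) (out : Option (Int × Int)) : Decidable (Spec_bactrackCoordinates rowI elementI board out) := by unfold Spec_bactrackCoordinates; infer_instance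

-- ===== CLAIM (what is proved, stated in full; the proofs are below) =====
def Claim_equal_bactrackCoordinates : Prop := ∀ (rowI : Int) (elementI : Int) (board : List (List String)), Dom_bactrackCoordinates rowI elementI board → Pre_bactrackCoordinates rowI elementI board → Spec_bactrackCoordinates rowI elementI board (bactrackCoordinates rowI elementI board)

-- ===== LEMMAS AND PROOFS =====

-- proof-only middle form: the backward scan over the flattened grid (first free cell
-- at or below `flat`); both ports are proved equal to it
def pvLoopB (board : List (List String)) (n : Int) (flat : Int) : Option (Int × Int) :=
  if _h : 0 ≤ flat then
    match PySem.Int.divmod? flat n with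
    | none => none
    | some (r, c) =>
      match PySem.List.pyGet? board r with
      | none => none
      | some row =>
        match PySem.List.pyGet? row c with
        | none => none
        | some s =>
          if !(PySem.Str.isIn "$" s) then some (r, c)
          else pvLoopB board n (flat - 1)
  else none
termination_by (flat + 1).toNat
decreasing_by omega

-- fuel comparison: an index below n*n-1 fits under the (n+1)*(n+1) fuel
theorem pv_fuel_lt (L : Nat) (flat : Int) (hub : flat ≤ (L : Int) * L - 1) :
    flat.toNat < (L + 1) * (L + 1) := by
  have h1 : ((L * L : Nat) : Int) = (L : Int) * L := by push_cast; ring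
  have h2 : L * L < (L + 1) * (L + 1) := by nlinarith
  omega

-- in-range cell access succeeds, row by row
theorem pvCell_some (board : List (List String)) (r c : Int)
    (hr0 : 0 ≤ r) (hrn : r < (board.length : Int)) (hc0 : 0 ≤ c)
    (hrow : ∀ row ∈ board, (board.length : Int) ≤ (row.length : Int)) (hcn : c < (board.length : Int)) :
    ∃ row s, PySem.List.pyGet? board r = some row ∧ PySem.List.pyGet? row c = some s := by
  have hrN : r.toNat < board.length := by omega
  have h1 : PySem.List.pyGet? board r = some board[r.toNat] :=
    PySem.List.pyGet?_eq_some_getElem board hr0 hrn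
  have hmem : board[r.toNat] ∈ board := List.getElem_mem hrN
  have hlen : (board.length : Int) ≤ (board[r.toNat].length : Int) := hrow _ hmem
  have hc : c < (board[r.toNat].length : Int) := lt_of_lt_of_le hcn hlen
  exact ⟨board[r.toNat], board[r.toNat][c.toNat], h1, PySem.List.pyGet?_eq_some_getElem _ hc0 hc⟩

-- divmod of a flat index r*n+e with 0 ≤ e < n recovers (r, e)
theorem pv_divmod_flat (n r e : Int) (hn : 0 < n) (he0 : 0 ≤ e) (hen : e < n) :
    PySem.Int.divmod? (r * n + e) n = some (r, e) := by
  have hdiv : PySem.Int.floordiv (r * n + e) n = r := by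
    rw [PySem.Int.floordiv_eq_iff_of_pos hn]
    constructor <;> nlinarith
  have hmod : PySem.Int.mod (r * n + e) n = e := by
    have := PySem.Int.floordiv_mul_add_mod (r * n + e) n
    rw [hdiv] at this; omega
  rw [show PySem.Int.divmod? (r * n + e) n
        = if n = 0 then none else some ((r * n + e).fdiv n, (r * n + e).fmod n) from rfl,
      if_neg (by omega : ¬ n = 0),
      show (r * n + e).fdiv n = r from hdiv, show (r * n + e).fmod n = e from hmod]

-- core correspondence 1: A's snake loop = the backward flat scan
theorem loop_eq (board : List (List String))
    (hrow : ∀ row ∈ board, (board.length : Int) ≤ (row.length : Int)) :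
    ∀ (fuel : Nat) (r e : Int), 0 ≤ r → r < (board.length : Int) → 0 ≤ e → e < (board.length : Int) →
      (r * (board.length : Int) + e).toNat < fuel →
      pvLoopA board ((board.length : Int) - 1) fuel r e =
        pvLoopB board (board.length : Int) (r * (board.length : Int) + e) := by
  intro fuel
  induction fuel with
  | zero => intro r e _ _ _ _ hf; omega
  | succ fuel ih =>
    intro r e hr0 hrn he0 hen hf
    set n : Int := (board.length : Int) with hn
    have hnpos : 0 < n := by omega
    have hflat0 : 0 ≤ r * n + e := by positivity
    obtain ⟨row, s, hrowE, hs⟩ := pvCell_some board r e hr0 hrn he0 hrow hen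
    have hdm : PySem.Int.divmod? (r * n + e) n = some (r, e) :=
      pv_divmod_flat n r e hnpos he0 hen
    rw [pvLoopA, pvLoopB]
    simp only [hrowE, hs, dif_pos hflat0, hdm]
    by_cases hdol : PySem.Str.isIn "$" s
    · simp only [hdol, if_true, Bool.not_true, Bool.false_eq_true, if_false]
      by_cases he1 : e - 1 < 0
      · have he : e = 0 := by omega
        simp only [if_pos he1]
        by_cases hr1 : r - 1 < 0
        · have hr : r = 0 := by omega
          have hm1 : r * n + e - 1 = -1 := by rw [hr, he]; ring
          rw [hm1, pvLoopB, dif_neg (by omega)]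
          simp [hr1]
        · simp only [if_neg hr1]
          have harith : (r - 1) * n + (n - 1) = r * n + e - 1 := by rw [he]; ring
          rw [← harith]
          refine ih (r - 1) (n - 1) (by omega) (by omega) (by omega) (by omega) ?_
          rw [harith]
          have h1 : 1 ≤ r * n := by nlinarith
          omega
      · simp only [if_neg he1]
        have harith : r * n + (e - 1) = r * n + e - 1 := by ring
        have h0 : 0 ≤ r * n := by positivity
        rw [← harith]
        exact ih r (e - 1) hr0 hrn (by omega) (by omega) (by omega)
    · have hdol' : PySem.Chars.isIn ['$'] s.toList = false := Bool.not_eq_true _ |>.mp hdol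
      simp [hdol']

-- A = backward flat scan, on all of Pre_
theorem A_eq_pvLoopB (rowI elementI : Int) (board : List (List String))
    (hpre : Pre_bactrackCoordinates rowI elementI board) :
    bactrackCoordinates rowI elementI board
      = pvLoopB board (board.length : Int) (rowI * (board.length : Int) + elementI - 1) := by
  unfold bactrackCoordinates
  rcases hpre with ⟨hr0, hrn, he0, hen, hrow⟩ | ⟨hr, he⟩
  · have hrow' : ∀ row ∈ board, (board.length : Int) ≤ (row.length : Int) := by
      intro row hm; exact_mod_cast hrow row hm
    have hnpos : 0 < (board.length : Int) := by omega
    by_cases he1 : elementI - 1 < 0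
    · have he' : elementI = 0 := by omega
      simp only [if_pos he1]
      by_cases hr1 : rowI - 1 < 0
      · have hr' : rowI = 0 := by omega
        have hm1 : rowI * (board.length : Int) + elementI - 1 = -1 := by rw [hr', he']; ring
        rw [hm1, pvLoopB, dif_neg (by omega)]
        simp [hr1]
      · simp only [if_neg hr1]
        have harith : (rowI - 1) * (board.length : Int) + ((board.length : Int) - 1) = rowI * (board.length : Int) + elementI - 1 := by rw [he']; ring
        have hfuel : ((rowI - 1) * (board.length : Int) + ((board.length : Int) - 1)).toNat < (board.length + 1) * (board.length + 1) :=
          pv_fuel_lt board.length _ (by nlinarith)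
        rw [← harith]
        exact loop_eq board hrow' _ (rowI - 1) ((board.length : Int) - 1) (by omega) (by omega) (by omega) (by omega) hfuel
    · simp only [if_neg he1]
      have hfuel : (rowI * (board.length : Int) + (elementI - 1)).toNat < (board.length + 1) * (board.length + 1) :=
        pv_fuel_lt board.length _ (by nlinarith)
      have harith2 : rowI * (board.length : Int) + (elementI - 1) = rowI * (board.length : Int) + elementI - 1 := by ring
      rw [← harith2]
      exact loop_eq board hrow' _ rowI (elementI - 1) (by omega) (by omega) (by omega) (by omega) hfuel
  · have hflat : rowI * (board.length : Int) + elementI - 1 < 0 := by nlinarith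
    rw [if_pos (by omega), if_pos (by omega), pvLoopB, dif_neg (by omega)]

-- core correspondence 2: the forward keep-last fold over range(m) = the backward flat scan
theorem fold_eq (board : List (List String))
    (hrow : ∀ row ∈ board, (board.length : Int) ≤ (row.length : Int))
    (hnpos : 0 < (board.length : Int)) :
    ∀ (m : Nat), (m : Int) ≤ (board.length : Int) * (board.length : Int) →
      (PySem.List.pyRange 0 (m : Int) 1).foldl (fun best f =>
        match PySem.Int.divmod? f (board.length : Int) with
        | none => best
        | some (r, c) =>
          match PySem.List.pyGet? board r with
          | none => best
          | some row =>
            match PySem.List.pyGet? row c with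
            | none => best
            | some s => if PySem.Str.isIn "$" s then best else some (r, c)) none
      = pvLoopB board (board.length : Int) ((m : Int) - 1) := by
  intro m
  induction m with
  | zero =>
    intro _
    rw [PySem.List.pyRange_one_eq_nil (by omega)]
    rw [pvLoopB, dif_neg (by omega)]
    rfl
  | succ m ih =>
    intro hub
    set n : Int := (board.length : Int) with hn
    have hm0 : (0 : Int) ≤ (m : Int) := by omega
    have hmlt : (m : Int) < n * n := by push_cast at hub ⊢; omega
    have hstep : ((m + 1 : Nat) : Int) = (m : Int) + 1 := by push_cast; ring
    rw [hstep, PySem.List.pyRange_one_succ_right hm0, List.foldl_append]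
    rw [ih (by omega)]
    -- evaluate the last step at flat index m
    have hr0 : 0 ≤ PySem.Int.floordiv (m : Int) n := by
      rw [PySem.Int.le_floordiv_iff_mul_le hnpos]; nlinarith
    have hrn : PySem.Int.floordiv (m : Int) n < n := by
      rw [PySem.Int.floordiv_lt_iff_lt_mul hnpos]; nlinarith
    have hc0 : 0 ≤ PySem.Int.mod (m : Int) n := PySem.Int.mod_nonneg _ hnpos
    have hcn : PySem.Int.mod (m : Int) n < n := PySem.Int.mod_lt _ hnpos
    have hdm : PySem.Int.divmod? (m : Int) n
        = some (PySem.Int.floordiv (m : Int) n, PySem.Int.mod (m : Int) n) := by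
      rw [show PySem.Int.divmod? (m : Int) n
            = if n = 0 then none else some ((m : Int).fdiv n, (m : Int).fmod n) from rfl,
          if_neg (by omega : ¬ n = 0)]
      rfl
    obtain ⟨row, s, hrowE, hs⟩ :=
      pvCell_some board (PySem.Int.floordiv (m : Int) n) (PySem.Int.mod (m : Int) n)
        hr0 hrn hc0 hrow hcn
    have hrhs : pvLoopB board n ((m : Int) + 1 - 1) = pvLoopB board n (m : Int) := by
      norm_num
    rw [hrhs]
    conv_rhs => rw [pvLoopB]
    simp only [List.foldl_cons, List.foldl_nil, dif_pos hm0, hdm, hrowE, hs]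
    by_cases hdol : PySem.Chars.isIn ['$'] s.toList <;> simp [hdol]

-- B = backward flat scan, on all of Pre_
theorem B_eq_pvLoopB (rowI elementI : Int) (board : List (List String))
    (hpre : Pre_bactrackCoordinates rowI elementI board) :
    bactrackCoordinates_alt rowI elementI board
      = pvLoopB board (board.length : Int) (rowI * (board.length : Int) + elementI - 1) := by
  simp only [bactrackCoordinates_alt]
  rcases hpre with ⟨hr0, hrn, he0, hen, hrow⟩ | ⟨hr, he⟩
  · have hrow' : ∀ row ∈ board, (board.length : Int) ≤ (row.length : Int) := by
      intro row hm; exact_mod_cast hrow row hm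
    have hnpos : 0 < (board.length : Int) := by omega
    set n : Int := (board.length : Int) with hn
    have hflat0 : 0 ≤ rowI * n + elementI := by positivity
    have hflatub : rowI * n + elementI ≤ n * n := by nlinarith
    have hm : ((rowI * n + elementI).toNat : Int) = rowI * n + elementI := by omega
    have := fold_eq board hrow' hnpos (rowI * n + elementI).toNat (by rw [← hn]; omega)
    rw [hm] at this
    simpa using this
  · have hflat : rowI * (board.length : Int) + elementI ≤ 0 := by nlinarith
    rw [PySem.List.pyRange_one_eq_nil (by omega)]
    rw [pvLoopB, dif_neg (by omega)]
    rfl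

-- ===== VERDICT (by name: the statement is the Claim_ definition above) =====
theorem bactrackCoordinates_spec : Claim_equal_bactrackCoordinates := by
  intro rowI elementI board _ hpre
  unfold Spec_bactrackCoordinates
  rw [A_eq_pvLoopB rowI elementI board hpre, B_eq_pvLoopB rowI elementI board hpre]
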